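-- pv_equiv track=rewrite | github.com/acgrdumlu/CodeWars-and-HackerRank | Python/operations_with_sets.py | process_2arrays
-- ===== SOURCE A (Python) =====
-- def process_2arrays(arr1, arr2):
-- 	arr1_solo = set(arr1)
-- 	arr2_solo = set(arr2)
--
-- 	def exists_in_both():
-- 		count = 0
-- 		for a in arr1:
-- 			if a in arr2_solo:
-- 				count += 1
-- 				arr1_solo.remove(a)
-- 				arr2_solo.remove(a)
-- 		return count
--
-- 	bothCount = exists_in_both()
--
-- 	def exists_in_one():
-- 		return len(arr1) + len(arr2) - bothCount * 2
--
-- 	return [bothCount, exists_in_one(), len(arr1_solo), len(arr2_solo)]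
-- ===== SOURCE B (Python) =====
-- def process_2arrays(arr1, arr2):
--     # flag table: 1 = seen in arr1, 2 = seen only in arr2, 3 = seen in both
--     flags = {}
--     for a in arr1:
--         flags[a] = 1
--     for b in arr2:
--         if flags.get(b) == 1:
--             flags[b] = 3
--         elif b not in flags:
--             flags[b] = 2
--     both = first_only = second_only = 0
--     for m in flags.values():
--         if m == 3:
--             both += 1
--         elif m == 1:
--             first_only += 1
--         else:
--             second_only += 1
--     return [both, len(arr1) + len(arr2) - 2 * both, first_only, second_only]
-- ===== Notes on version B (the rewrite author's own statement) =====
-- stated objective: alternative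
-- what changed: Replaces A's two sets with an element-by-element loop that mutates them via set.remove by a single flag table (dict mapping each element to 1 = seen in arr1, 2 = only arr2, 3 = both) built in two marking passes and tallied in one scan over its values.
import Mathlib
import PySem

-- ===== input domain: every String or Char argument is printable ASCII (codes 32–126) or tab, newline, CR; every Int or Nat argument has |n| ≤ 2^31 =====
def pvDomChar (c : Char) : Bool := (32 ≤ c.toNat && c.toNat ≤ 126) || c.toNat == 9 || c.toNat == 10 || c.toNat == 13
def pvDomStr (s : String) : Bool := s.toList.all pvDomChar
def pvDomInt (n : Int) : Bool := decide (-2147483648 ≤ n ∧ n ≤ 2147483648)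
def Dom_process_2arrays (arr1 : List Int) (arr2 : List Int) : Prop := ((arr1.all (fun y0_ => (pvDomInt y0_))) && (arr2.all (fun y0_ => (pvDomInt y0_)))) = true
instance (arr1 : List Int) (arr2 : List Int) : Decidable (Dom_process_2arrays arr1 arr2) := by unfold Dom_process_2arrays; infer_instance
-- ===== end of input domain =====

-- B replaces A's sets-with-mutating-remove loop by a single flag table (dict element -> 1/2/3
-- "seen in arr1 / only arr2 / both") built in two passes and tallied in one scan; objective: alternative.

-- ===== PORT A =====
-- Loop state of A's nested exists_in_both: (count, arr1_solo, arr2_solo).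
-- Python's set.remove is ported as Set.discard: it never raises here, because the branch
-- guarantees a ∈ arr2_solo, and then a (an element of arr1) is still present in arr1_solo too.
def pvStepA (st : Int × PySem.Set Int × PySem.Set Int) (a : Int) : Int × PySem.Set Int × PySem.Set Int :=
  if PySem.Set.contains st.2.2 a then
    (st.1 + 1, PySem.Set.discard st.2.1 a, PySem.Set.discard st.2.2 a)
  else st

def process_2arrays (arr1 : List Int) (arr2 : List Int) : List Int :=
  let arr1_solo := PySem.Set.ofList arr1
  let arr2_solo := PySem.Set.ofList arr2
  let st := arr1.foldl pvStepA (0, arr1_solo, arr2_solo)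
  let bothCount := st.1
  [bothCount, (arr1.length : Int) + (arr2.length : Int) - bothCount * 2,
   PySem.Set.len st.2.1, PySem.Set.len st.2.2]

-- ===== PORT B =====
-- first pass: flags[a] = 1
def pvIns1 (d : PySem.Dict Int Int) (a : Int) : PySem.Dict Int Int := d.insert a 1
-- second pass: if flags.get(b) == 1: flags[b] = 3  elif b not in flags: flags[b] = 2
def pvIns2 (d : PySem.Dict Int Int) (b : Int) : PySem.Dict Int Int :=
  if d.get? b == some 1 then d.insert b 3
  else if !(d.contains b) then d.insert b 2
  else d
-- tally pass over flags.values(): state (both, first_only, second_only)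
def pvCount (s : Int × Int × Int) (m : Int) : Int × Int × Int :=
  if m == 3 then (s.1 + 1, s.2.1, s.2.2)
  else if m == 1 then (s.1, s.2.1 + 1, s.2.2)
  else (s.1, s.2.1, s.2.2 + 1)

def process_2arrays_alt (arr1 : List Int) (arr2 : List Int) : List Int :=
  let flags := arr2.foldl pvIns2 (arr1.foldl pvIns1 PySem.Dict.empty)
  let st := (PySem.Dict.values flags).foldl pvCount (0, 0, 0)
  [st.1, (arr1.length : Int) + (arr2.length : Int) - 2 * st.1, st.2.1, st.2.2]

-- ===== PRECONDITION & SPEC =====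
def Spec_process_2arrays (arr1 : List Int) (arr2 : List Int) (out : List Int) : Prop := out = process_2arrays_alt arr1 arr2
instance (arr1 : List Int) (arr2 : List Int) (out : List Int) : Decidable (Spec_process_2arrays arr1 arr2 out) := by unfold Spec_process_2arrays; infer_instance

-- ===== CLAIM (what is proved, stated in full; the proofs are below) =====
def Claim_equal_process_2arrays : Prop := ∀ (arr1 : List Int) (arr2 : List Int), Dom_process_2arrays arr1 arr2 → Spec_process_2arrays arr1 arr2 (process_2arrays arr1 arr2)

-- ===== LEMMAS AND PROOFS =====

-- ---- A-side characterisation (as in the loop invariant of exists_in_both) ----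

-- A nodup list containing `a`: filtering by `x == a || p x` counts exactly one more
-- element than filtering by `p x && !(x == a)`.
lemma pvCountSplit (a : Int) (p : Int → Bool) :
    ∀ t : List Int, t.Nodup → a ∈ t →
      (t.filter (fun x => x == a || p x)).length
        = (t.filter (fun x => p x && !(x == a))).length + 1 := by
  intro t
  induction t with
  | nil => intro _ h; cases h
  | cons b t ih =>
    intro hnd hmem
    have hb : b ∉ t := (List.nodup_cons.mp hnd).1
    have hnd' : t.Nodup := (List.nodup_cons.mp hnd).2
    by_cases hba : b = a
    · subst hba
      have h1 : t.filter (fun x => x == b || p x) = t.filter p :=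
        List.filter_congr (fun x hx => by
          have hxb : (x == b) = false := beq_eq_false_iff_ne.mpr (fun e => hb (e ▸ hx))
          simp [hxb])
      have h2 : t.filter (fun x => p x && !(x == b)) = t.filter p :=
        List.filter_congr (fun x hx => by
          have hxb : (x == b) = false := beq_eq_false_iff_ne.mpr (fun e => hb (e ▸ hx))
          simp [hxb])
      simp [h1, h2]
    · have ha : a ∈ t := by
        rcases List.mem_cons.mp hmem with h | h
        · exact absurd h.symm hba
        · exact h
      have hbeq : (b == a) = false := beq_eq_false_iff_ne.mpr hba
      have hih := ih hnd' ha
      by_cases hpb : p b = true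
      · simp [hbeq, hpb, hih]
      · have hpb' : p b = false := by simpa using hpb
        simp [hbeq, hpb', hih]

-- Characterisation of A's loop: the count gains one per element of t2 occurring in l,
-- and the two carried sets end up as the corresponding filters.
lemma pvLoopA_spec (l : List Int) : ∀ (c : Int) (t1 t2 : List Int), t2.Nodup →
    l.foldl pvStepA (c, t1, t2) =
      (c + ((t2.filter (fun x => List.contains l x)).length : Int),
       t1.filter (fun x => !(List.contains t2 x && List.contains l x)),
       t2.filter (fun x => !(List.contains l x))) := by
  induction l with
  | nil => intro c t1 t2 _; simp
  | cons a l ih =>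
    intro c t1 t2 hnd
    by_cases h : PySem.Set.contains t2 a
    · have ha : a ∈ t2 := by simpa [PySem.Set.contains] using h
      have hstep : pvStepA (c, t1, t2) a
          = (c + 1, t1.filter (fun y => !(y == a)), t2.filter (fun y => !(y == a))) := by
        simp only [pvStepA]
        rw [if_pos h]
        rfl
      rw [List.foldl_cons, hstep,
        ih (c + 1) (t1.filter (fun y => !(y == a))) (t2.filter (fun y => !(y == a))) (hnd.filter _)]
      simp only [Prod.mk.injEq]
      refine ⟨?_, ?_, ?_⟩
      · simp only [List.filter_filter]
        have hc : t2.filter (fun x => List.contains (a :: l) x)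
            = t2.filter (fun x => x == a || List.contains l x) :=
          List.filter_congr (fun x _ => by rw [List.contains_cons])
        have h2 : (t2.filter (fun x => x == a || List.contains l x)).length
            = (t2.filter (fun x => List.contains l x && !(x == a))).length + 1 :=
          pvCountSplit a (fun x => List.contains l x) t2 hnd ha
        rw [hc, h2]
        push_cast
        ring
      · simp only [List.filter_filter]
        refine List.filter_congr (fun x hx => ?_)
        by_cases hxa : x = a
        · subst hxa
          simp [ha]
        · have hxa' : (x == a) = false := beq_eq_false_iff_ne.mpr hxa
          simp [hxa, hxa', List.mem_filter]
      · simp only [List.filter_filter]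
        refine List.filter_congr (fun x hx => ?_)
        by_cases hxa : x = a
        · subst hxa
          simp
        · have hxa' : (x == a) = false := beq_eq_false_iff_ne.mpr hxa
          simp [hxa, hxa']
    · have ha : a ∉ t2 := by simpa [PySem.Set.contains] using h
      have hstep : pvStepA (c, t1, t2) a = (c, t1, t2) := by
        simp only [pvStepA]
        rw [if_neg h]
      rw [List.foldl_cons, hstep, ih c t1 t2 hnd]
      simp only [Prod.mk.injEq]
      refine ⟨?_, ?_, ?_⟩
      · have hc : t2.filter (fun x => List.contains (a :: l) x)
            = t2.filter (fun x => List.contains l x) :=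
          List.filter_congr (fun x hx => by
            have hxa : ¬ x = a := fun e => ha (e ▸ hx)
            have hxa' : (x == a) = false := beq_eq_false_iff_ne.mpr hxa
            rw [List.contains_cons]
            simp [hxa'])
        rw [hc]
      · refine List.filter_congr (fun x hx => ?_)
        by_cases hxt : x ∈ t2
        · have hxa : ¬ x = a := fun e => ha (e ▸ hxt)
          simp [hxa]
        · simp [hxt]
      · refine List.filter_congr (fun x hx => ?_)
        have hxa : ¬ x = a := fun e => ha (e ▸ hx)
        have hxa' : (x == a) = false := beq_eq_false_iff_ne.mpr hxa
        simp [hxa]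

-- ---- B-side characterisation ----

-- the value transform performed by the second pass on an existing key
def pvT (x : Int) : Int := if x = 1 then 3 else x

lemma pvKeysOfItems (d : PySem.Dict Int Int) (ks : List Int) (f : Int → Int)
    (h : d.items = ks.map (fun k => (k, f k))) : PySem.Dict.keys d = ks := by
  simp only [PySem.Dict.keys, h, List.map_map]
  rw [show (Prod.fst ∘ fun k : Int => (k, f k)) = id from rfl, List.map_id]

lemma pvLoop1_spec : ∀ (l : List Int) (d : PySem.Dict Int Int) (ks : List Int),
    d.items = ks.map (fun k => (k, (1 : Int))) →
    (l.foldl pvIns1 d).items = (PySem.Set.update ks l).map (fun k => (k, (1 : Int))) := by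
  intro l
  induction l with
  | nil =>
    intro d ks h
    rw [List.foldl_nil, PySem.Set.update_nil]
    exact h
  | cons a l ih =>
    intro d ks h
    have hkeys : PySem.Dict.keys d = ks := pvKeysOfItems d ks _ h
    rw [List.foldl_cons, PySem.Set.update_cons]
    by_cases ha : a ∈ ks
    · have hc : PySem.Dict.contains d a = true := by
        rw [PySem.Dict.contains_eq_decide_mem_keys, hkeys]; simpa
      have hitems : (pvIns1 d a).items = ks.map (fun k => (k, (1 : Int))) := by
        simp only [pvIns1]
        rw [PySem.Dict.items_insert_of_contains _ _ hc, h, List.map_map]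
        refine List.map_congr_left (fun k hk => ?_)
        by_cases hka : k = a
        · subst hka; simp
        · simp [Function.comp, beq_eq_false_iff_ne.mpr hka]
      rw [PySem.Set.add_of_mem ha]
      exact ih _ ks hitems
    · have hc : PySem.Dict.contains d a = false := by
        rw [PySem.Dict.contains_eq_decide_mem_keys, hkeys]; simpa
      have hitems : (pvIns1 d a).items = (ks ++ [a]).map (fun k => (k, (1 : Int))) := by
        simp [pvIns1, PySem.Dict.items_insert_of_not_contains _ _ hc, h]
      rw [PySem.Set.add_of_not_mem ha]
      exact ih _ (ks ++ [a]) hitems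

lemma pvLoop2_spec : ∀ (l : List Int) (d : PySem.Dict Int Int) (ks : List Int) (f : Int → Int),
    ks.Nodup → d.items = ks.map (fun k => (k, f k)) →
    (l.foldl pvIns2 d).items =
      (PySem.Set.update ks l).map
        (fun k => (k, if k ∈ l then (if k ∈ ks then pvT (f k) else 2) else f k)) := by
  intro l
  induction l with
  | nil =>
    intro d ks f _ h
    simp only [List.foldl_nil, PySem.Set.update_nil]
    rw [h]
    exact List.map_congr_left (fun k _ => by simp)
  | cons b l ih =>
    intro d ks f hnd h
    have hkeys : PySem.Dict.keys d = ks := pvKeysOfItems d ks f h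
    have hndk : (PySem.Dict.keys d).Nodup := hkeys ▸ hnd
    rw [List.foldl_cons, PySem.Set.update_cons]
    by_cases hb : b ∈ ks
    · have hget : d.get? b = some (f b) :=
        PySem.Dict.get?_of_mem_items _ (by rw [h]; exact List.mem_map_of_mem hb) hndk
      have hc : PySem.Dict.contains d b = true := by
        rw [PySem.Dict.contains_eq_decide_mem_keys, hkeys]; simpa
      by_cases hfb : f b = 1
      · have hstep : pvIns2 d b = d.insert b 3 := by simp [pvIns2, hget, hfb]
        have hitems : (d.insert b 3).items
            = ks.map (fun k => (k, if k = b then (3 : Int) else f k)) := by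
          rw [PySem.Dict.items_insert_of_contains _ _ hc, h, List.map_map]
          refine List.map_congr_left (fun k hk => ?_)
          by_cases hkb : k = b
          · subst hkb; simp
          · simp [Function.comp, beq_eq_false_iff_ne.mpr hkb, hkb]
        rw [hstep, PySem.Set.add_of_mem hb,
          ih _ ks (fun k => if k = b then (3 : Int) else f k) hnd hitems]
        refine List.map_congr_left (fun k hk => ?_)
        by_cases hkb : k = b
        · subst hkb
          by_cases hbl : k ∈ l <;> simp [hbl, hb, pvT, hfb]
        · by_cases hkl : k ∈ l <;> by_cases hkk : k ∈ ks <;>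
            simp [hkb, hkl, hkk, pvT]
      · have hstep : pvIns2 d b = d := by simp [pvIns2, hget, hfb, hc]
        rw [hstep, PySem.Set.add_of_mem hb, ih _ ks f hnd h]
        refine List.map_congr_left (fun k hk => ?_)
        by_cases hkb : k = b
        · subst hkb
          by_cases hbl : k ∈ l <;> simp [hbl, hb, pvT, hfb]
        · by_cases hkl : k ∈ l <;> simp [hkb, hkl]
    · have hget : d.get? b = none := by
        rw [PySem.Dict.get?_eq_none_iff_not_mem_keys, hkeys]; exact hb
      have hc : PySem.Dict.contains d b = false := by
        rw [PySem.Dict.contains_eq_decide_mem_keys, hkeys]; simpa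
      have hstep : pvIns2 d b = d.insert b 2 := by simp [pvIns2, hget, hc]
      have hitems : (d.insert b 2).items
          = (ks ++ [b]).map (fun k => (k, if k = b then (2 : Int) else f k)) := by
        rw [PySem.Dict.items_insert_of_not_contains _ _ hc, h, List.map_append]
        congr 1
        · refine List.map_congr_left (fun k hk => ?_)
          have hkb : ¬ k = b := fun e => hb (e ▸ hk)
          simp [hkb]
        · simp
      have hnd' : (ks ++ [b]).Nodup := by
        simp [List.nodup_append, hnd]
        intro a ha e
        exact hb (e ▸ ha)
      rw [hstep, PySem.Set.add_of_not_mem hb,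
        ih _ (ks ++ [b]) (fun k => if k = b then (2 : Int) else f k) hnd' hitems]
      refine List.map_congr_left (fun k hk => ?_)
      by_cases hkb : k = b
      · subst hkb
        by_cases hbl : k ∈ l <;> simp [hbl, hb, pvT]
      · have hm : (k ∈ ks ++ [b]) ↔ k ∈ ks := by simp [hkb]
        by_cases hkl : k ∈ l <;> by_cases hkk : k ∈ ks <;>
          simp [hkb, hkl, hkk, hm, pvT]

lemma pvCountFold : ∀ (ms : List Int) (c1 c2 c3 : Int),
    ms.foldl pvCount (c1, c2, c3) =
      (c1 + ((ms.filter (fun m => m == 3)).length : Int),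
       c2 + ((ms.filter (fun m => m == 1)).length : Int),
       c3 + ((ms.filter (fun m => !(m == 3) && !(m == 1))).length : Int)) := by
  intro ms
  induction ms with
  | nil => intro c1 c2 c3; simp
  | cons m ms ih =>
    intro c1 c2 c3
    by_cases h3 : m = 3
    · subst h3
      rw [List.foldl_cons]
      have : pvCount (c1, c2, c3) 3 = (c1 + 1, c2, c3) := by simp [pvCount]
      rw [this, ih]
      simp only [List.filter_cons]
      norm_num
      push_cast
      omega
    · by_cases h1 : m = 1
      · subst h1
        rw [List.foldl_cons]
        have : pvCount (c1, c2, c3) 1 = (c1, c2 + 1, c3) := by simp [pvCount]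
        rw [this, ih]
        simp only [List.filter_cons]
        norm_num
        push_cast
        omega
      · rw [List.foldl_cons]
        have : pvCount (c1, c2, c3) m = (c1, c2, c3 + 1) := by
          simp [pvCount, h3, h1]
        rw [this, ih]
        simp only [List.filter_cons]
        have hb3 : (m == (3 : Int)) = false := beq_eq_false_iff_ne.mpr h3
        have hb1 : (m == (1 : Int)) = false := beq_eq_false_iff_ne.mpr h1
        simp only [hb3, hb1]
        norm_num
        push_cast
        omega

-- two nodup lists filtered by predicates carving out the same set have filters of equal length
lemma pvLenFilterEq (u v : List Int) (p q : Int → Bool) (hu : u.Nodup) (hv : v.Nodup)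
    (h : ∀ x, (x ∈ u ∧ p x = true) ↔ (x ∈ v ∧ q x = true)) :
    (u.filter p).length = (v.filter q).length := by
  rw [← List.toFinset_card_of_nodup (hu.filter _), ← List.toFinset_card_of_nodup (hv.filter _)]
  congr 1
  ext x
  simp only [List.mem_toFinset, List.mem_filter]
  exact h x

-- ===== VERDICT (by name: the statement is the Claim_ definition above) =====
theorem process_2arrays_spec : Claim_equal_process_2arrays := by
  unfold Claim_equal_process_2arrays
  intro arr1 arr2 _
  unfold Spec_process_2arrays
  simp only [process_2arrays, process_2arrays_alt]
  -- A side
  rw [pvLoopA_spec arr1 0 (PySem.Set.ofList arr1) (PySem.Set.ofList arr2) (PySem.Set.nodup_ofList _)]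
  -- B side: the flag table's items
  have h1 : (arr1.foldl pvIns1 PySem.Dict.empty).items
      = (PySem.Set.ofList arr1).map (fun k => (k, (1 : Int))) := by
    have := pvLoop1_spec arr1 PySem.Dict.empty [] rfl
    simpa [PySem.Set.update_nil_left] using this
  have hnd1 : (PySem.Set.ofList arr1).Nodup := PySem.Set.nodup_ofList _
  have h2 := pvLoop2_spec arr2 (arr1.foldl pvIns1 PySem.Dict.empty)
      (PySem.Set.ofList arr1) (fun _ => (1 : Int)) hnd1 h1
  set U : List Int := PySem.Set.update (PySem.Set.ofList arr1) arr2 with hU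
  have hndU : U.Nodup := PySem.Set.nodup_update _ _ hnd1
  -- the final value function, in membership terms
  have h3 : (arr2.foldl pvIns2 (arr1.foldl pvIns1 PySem.Dict.empty)).items
      = U.map (fun k => (k, if k ∈ arr2 then (if k ∈ arr1 then (3 : Int) else 2) else 1)) := by
    rw [h2]
    refine List.map_congr_left (fun k hk => ?_)
    by_cases hk2 : k ∈ arr2 <;> by_cases hk1 : k ∈ arr1 <;>
      simp [hk1, hk2, PySem.Set.mem_ofList, pvT]
  have hvals : PySem.Dict.values (arr2.foldl pvIns2 (arr1.foldl pvIns1 PySem.Dict.empty))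
      = U.map (fun k => if k ∈ arr2 then (if k ∈ arr1 then (3 : Int) else 2) else 1) := by
    simp only [PySem.Dict.values, h3, List.map_map]
    rfl
  rw [hvals]
  -- tally over the mapped values = filters over U
  rw [pvCountFold]
  simp only [List.filter_map, List.length_map, Function.comp_def]
  -- component equalities
  have hnd2 : (PySem.Set.ofList arr2).Nodup := PySem.Set.nodup_ofList _
  have hboth :
      ((PySem.Set.ofList arr2).filter (fun x => List.contains arr1 x)).length
        = (U.filter (fun k =>
            (if k ∈ arr2 then (if k ∈ arr1 then (3 : Int) else 2) else 1) == 3)).length := by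
    refine pvLenFilterEq _ _ _ _ hnd2 hndU (fun x => ?_)
    constructor
    · rintro ⟨hx, hp⟩
      have hx2 : x ∈ arr2 := by simpa [PySem.Set.mem_ofList] using hx
      have hx1 : x ∈ arr1 := by simpa using hp
      exact ⟨by simp [hU, PySem.Set.mem_update, PySem.Set.mem_ofList, hx2],
        by simp [hx1, hx2]⟩
    · rintro ⟨hx, hq⟩
      by_cases hx2 : x ∈ arr2 <;> by_cases hx1 : x ∈ arr1 <;>
        simp_all [PySem.Set.mem_ofList]
  have hsolo1 :
      ((PySem.Set.ofList arr1).filter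
          (fun x => !(List.contains (PySem.Set.ofList arr2) x && List.contains arr1 x))).length
        = (U.filter (fun k =>
            (if k ∈ arr2 then (if k ∈ arr1 then (3 : Int) else 2) else 1) == 1)).length := by
    refine pvLenFilterEq _ _ _ _ hnd1 hndU (fun x => ?_)
    constructor
    · rintro ⟨hx, hp⟩
      have hx1 : x ∈ arr1 := by simpa [PySem.Set.mem_ofList] using hx
      have hx2 : x ∉ arr2 := by
        intro hx2
        simp [hx1, hx2, PySem.Set.mem_ofList] at hp
      exact ⟨by simp [hU, PySem.Set.mem_update, PySem.Set.mem_ofList, hx1],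
        by simp [hx1, hx2]⟩
    · rintro ⟨hx, hq⟩
      by_cases hx2 : x ∈ arr2 <;> by_cases hx1 : x ∈ arr1 <;>
        simp_all [PySem.Set.mem_ofList]
  have hsolo2 :
      ((PySem.Set.ofList arr2).filter (fun x => !(List.contains arr1 x))).length
        = (U.filter (fun k =>
            !((if k ∈ arr2 then (if k ∈ arr1 then (3 : Int) else 2) else 1) == 3)
              && !((if k ∈ arr2 then (if k ∈ arr1 then (3 : Int) else 2) else 1) == 1))).length := by
    refine pvLenFilterEq _ _ _ _ hnd2 hndU (fun x => ?_)
    constructor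
    · rintro ⟨hx, hp⟩
      have hx2 : x ∈ arr2 := by simpa [PySem.Set.mem_ofList] using hx
      have hx1 : x ∉ arr1 := by
        intro hx1
        simp [hx1] at hp
      exact ⟨by simp [hU, PySem.Set.mem_update, PySem.Set.mem_ofList, hx2],
        by simp [hx1, hx2]⟩
    · rintro ⟨hx, hq⟩
      by_cases hx2 : x ∈ arr2 <;> by_cases hx1 : x ∈ arr1 <;>
        simp_all [PySem.Set.mem_ofList]
  simp only [PySem.Set.len, List.cons.injEq, and_true]
  refine ⟨?_, ?_, ?_, ?_⟩
  · rw [hboth]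
  · rw [hboth]; omega
  · rw [hsolo1]; omega
  · rw [hsolo2]; omega
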